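-- pv_equiv track=rewrite | github.com/cog-isa/htm-core | hierarchy/util.py | unzip_binary_3
-- ===== SOURCE A (Python) =====
-- def unzip_binary_3(a, size, column_size):
--     res = [[[0 for _ in range(column_size)] for _ in range(size)] for _ in range(size)]
--     x = 1
--     for i, I in enumerate(res):
--         for j, J in enumerate(I):
--             for k, K in enumerate(J):
--                 res[i][j][k] = int((a & x) > 0)
--                 x *= 2
--     return res
-- ===== SOURCE B (Python) =====
-- def unzip_binary_3(a, size, column_size):
--     s = size if size > 0 else 0
--     c = column_size if column_size > 0 else 0
--     bits = [(a >> p) & 1 for p in range(s * s * c)]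
--     rows = [bits[r * c:(r + 1) * c] for r in range(s * s)]
--     return [rows[i * s:(i + 1) * s] for i in range(s)]
-- ===== Notes on version B (the rewrite author's own statement) =====
-- stated objective: faster
-- what changed: A fills a preallocated 3D array in a triple nested loop with a running mask x that doubles each step; B builds one flat list of bits with [(a >> p) & 1 for p in range(s*s*c)] and then reshapes it into the 3D structure by slicing rows and planes.
import Mathlib
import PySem

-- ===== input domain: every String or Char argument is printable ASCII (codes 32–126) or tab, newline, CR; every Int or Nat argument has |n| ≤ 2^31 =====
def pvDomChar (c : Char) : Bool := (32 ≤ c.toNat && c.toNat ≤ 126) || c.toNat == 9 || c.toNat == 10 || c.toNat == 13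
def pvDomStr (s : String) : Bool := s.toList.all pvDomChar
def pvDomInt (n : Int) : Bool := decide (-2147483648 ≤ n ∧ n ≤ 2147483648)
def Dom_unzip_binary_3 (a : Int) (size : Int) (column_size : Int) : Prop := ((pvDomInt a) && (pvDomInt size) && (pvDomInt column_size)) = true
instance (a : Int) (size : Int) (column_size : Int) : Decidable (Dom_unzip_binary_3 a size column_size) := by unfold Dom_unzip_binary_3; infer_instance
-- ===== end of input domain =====

-- B replaces A's triple nested accumulator loop (running doubling mask, in-place fill) by a
-- two-phase build: one flat bit table indexed by shift position, then reshape by slicing.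


-- ===== PORT A =====
-- literal transliteration of A: build the zero-filled 3D array, then the triple loop
-- with the running mask x (x *= 2 each step), rebuilding each list as the fill proceeds.
def unzip_binary_3 (a : Int) (size : Int) (column_size : Int) : List (List (List Int)) :=
  let res : List (List (List Int)) :=
    (PySem.List.pyRange 0 size 1).map (fun _ =>
      (PySem.List.pyRange 0 size 1).map (fun _ =>
        (PySem.List.pyRange 0 column_size 1).map (fun _ => (0 : Int))))
  (res.foldl (fun (st : Int × List (List (List Int))) I =>
      let r := I.foldl (fun (st2 : Int × List (List Int)) J =>
          let r2 := J.foldl (fun (st3 : Int × List Int) _K =>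
              (st3.1 * 2, st3.2 ++ [if PySem.Int.band a st3.1 > 0 then (1 : Int) else 0]))
            (st2.1, ([] : List Int))
          (r2.1, st2.2 ++ [r2.2]))
        (st.1, ([] : List (List Int)))
      (r.1, st.2 ++ [r.2]))
    ((1 : Int), ([] : List (List (List Int))))).2

-- ===== PORT B =====
-- literal transliteration of B (Source B): flat bit table via (a >> p) & 1, then reshape by slicing.
def unzip_binary_3_alt (a : Int) (size : Int) (column_size : Int) : List (List (List Int)) :=
  let s : Int := if size > 0 then size else 0
  let c : Int := if column_size > 0 then column_size else 0
  -- (a >> p) & 1 : p comes from range(0, s*s*c), hence 0 ≤ p, so `>>> p.toNat` is exact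
  let bits : List Int :=
    (PySem.List.pyRange 0 (s * s * c) 1).map (fun p => PySem.Int.band (a >>> p.toNat) 1)
  let rows : List (List Int) :=
    (PySem.List.pyRange 0 (s * s) 1).map (fun r =>
      PySem.List.slice bits (some (r * c)) (some ((r + 1) * c)))
  (PySem.List.pyRange 0 s 1).map (fun i =>
    PySem.List.slice rows (some (i * s)) (some ((i + 1) * s)))

-- ===== PRECONDITION & SPEC =====
def Spec_unzip_binary_3 (a : Int) (size : Int) (column_size : Int) (out : List (List (List Int))) : Prop := out = unzip_binary_3_alt a size column_size
instance (a : Int) (size : Int) (column_size : Int) (out : List (List (List Int))) : Decidable (Spec_unzip_binary_3 a size column_size out) := by unfold Spec_unzip_binary_3; infer_instance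

-- ===== CLAIM (what is proved, stated in full; the proofs are below) =====
def Claim_equal_unzip_binary_3 : Prop := ∀ (a : Int) (size : Int) (column_size : Int), Dom_unzip_binary_3 a size column_size → Spec_unzip_binary_3 a size column_size (unzip_binary_3 a size column_size)

-- ===== LEMMAS AND PROOFS =====

-- the bit of a at position p, as A computes it (mask test)
def pvBit (a : Int) (p : Nat) : Int :=
  if PySem.Int.band a (2 ^ p) > 0 then 1 else 0

-- the canonical value both ports are shown to equal
def pvCanon (a : Int) (S C : Nat) : List (List (List Int)) :=
  (List.range S).map (fun i =>
    (List.range S).map (fun j =>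
      (List.range C).map (fun k => pvBit a (i * (S * C) + j * C + k))))

theorem band_negSucc_nonneg (m : Nat) (b : Int) (hb : 0 ≤ b) :
    PySem.Int.band (Int.negSucc m) b = ((b.toNat - (b.toNat &&& m) : Nat) : Int) := by
  unfold PySem.Int.band
  have h0 : ¬ (0 ≤ Int.negSucc m) := by omega
  have hm : (-Int.negSucc m - 1).toNat = m := by omega
  rw [if_neg h0, if_pos hb, hm]

theorem pvBit_shift (a : Int) (p : Nat) :
    PySem.Int.band (a >>> p) 1 = pvBit a p := by
  unfold pvBit
  have hb : ∀ u v : Nat, PySem.Int.band (Int.ofNat u) (Int.ofNat v) = Int.ofNat (u &&& v) := by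
    intro u v; simpa [Int.ofNat_eq_natCast] using PySem.Int.band_natCast u v
  have h2 : ((2:Int) ^ p) = Int.ofNat (2 ^ p) := by
    simp [Int.ofNat_eq_natCast]
  cases a with
  | ofNat n =>
    have h1 : (Int.ofNat n) >>> p = Int.ofNat (n >>> p) := rfl
    have h3 : (1 : Int) = Int.ofNat 1 := rfl
    rw [h1, h3, h2, hb, hb, Nat.and_one_is_mod, Nat.and_two_pow,
      Nat.shiftRight_eq_div_pow, Nat.testBit_eq_decide_div_mod_eq]
    rcases Nat.mod_two_eq_zero_or_one (n / 2 ^ p) with h | h <;>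
      simp [h, Int.ofNat_eq_natCast]
  | negSucc n =>
    have h1 : (Int.negSucc n) >>> p = Int.negSucc (n >>> p) := rfl
    rw [h1, band_negSucc_nonneg _ 1 (by omega), h2,
      band_negSucc_nonneg _ _ (by exact Int.ofNat_nonneg _)]
    have ht : (Int.ofNat (2 ^ p)).toNat = 2 ^ p := rfl
    have ho : ((1:Int)).toNat = 1 := rfl
    rw [ht, ho, Nat.and_comm (2^p) n, Nat.and_two_pow, Nat.one_and_eq_mod_two,
      Nat.shiftRight_eq_div_pow, Nat.testBit_eq_decide_div_mod_eq]
    rcases Nat.mod_two_eq_zero_or_one (n / 2 ^ p) with h | h <;>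
      simp [h] <;> omega

theorem pv_inner_fold (a : Int) {α : Type} (l : List α) (m : Nat) (acc : List Int) :
    l.foldl (fun (st3 : Int × List Int) _ =>
        (st3.1 * 2, st3.2 ++ [if PySem.Int.band a st3.1 > 0 then (1 : Int) else 0]))
      ((2 ^ m : Int), acc)
    = ((2 ^ (m + l.length) : Int),
       acc ++ (List.range l.length).map (fun k => pvBit a (m + k))) := by
  induction l generalizing m acc with
  | nil => simp
  | cons x xs ih =>
    simp only [List.foldl_cons]
    have h1 : ((2:Int) ^ m * 2) = 2 ^ (m + 1) := by ring
    have h2 : (if PySem.Int.band a (2 ^ m) > 0 then (1:Int) else 0) = pvBit a m := rfl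
    have hf : (fun k => pvBit a (m + k)) ∘ Nat.succ = fun k => pvBit a (m + 1 + k) := by
      funext k; simp only [Function.comp_apply]; congr 1; omega
    rw [h1, h2, ih (m + 1) (acc ++ [pvBit a m]), Prod.mk.injEq]
    refine ⟨by rw [show m + 1 + xs.length = m + (x :: xs).length by simp [List.length_cons]; omega], ?_⟩
    simp [List.range_succ_eq_map, List.map_map, hf]

theorem pv_block_fold {γ : Type} (g : Int → Int × γ) (W : Nat) (blk : Nat → γ)
    (hg : ∀ m : Nat, g ((2 ^ m : Int)) = ((2 ^ (m + W) : Int), blk m))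
    {α : Type} (l : List α) (m : Nat) (acc : List γ) :
    l.foldl (fun (st : Int × List γ) _ => ((g st.1).1, st.2 ++ [(g st.1).2]))
      ((2 ^ m : Int), acc)
    = ((2 ^ (m + l.length * W) : Int),
       acc ++ (List.range l.length).map (fun j => blk (m + j * W))) := by
  induction l generalizing m acc with
  | nil => simp
  | cons x xs ih =>
    simp only [List.foldl_cons, hg m]
    have hf : (fun j => blk (m + j * W)) ∘ Nat.succ = fun j => blk (m + W + j * W) := by
      funext j; simp only [Function.comp_apply, Nat.succ_eq_add_one]; congr 1; ring
    rw [ih (m + W) (acc ++ [blk m]), Prod.mk.injEq]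
    refine ⟨by rw [show m + W + xs.length * W = m + (x :: xs).length * W by simp [List.length_cons]; ring], ?_⟩
    simp [List.range_succ_eq_map, List.map_map, hf]

theorem pv_drop_take_range {γ : Type} (f : Nat → γ) (N d t : Nat) (h : d + t ≤ N) :
    (((List.range N).map f).drop d).take t = (List.range t).map (fun k => f (d + k)) := by
  have key : List.take t (List.drop d (List.range N)) = (List.range t).map (fun k => d + k) := by
    have hN : N = d + (N - d) := by omega
    rw [hN, List.range_add]
    have hd : List.drop d (List.range d ++ List.map (fun x => d + x) (List.range (N - d)))
        = List.map (fun x => d + x) (List.range (N - d)) := by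
      have := List.drop_left (l₁ := List.range d) (l₂ := List.map (fun x => d + x) (List.range (N - d)))
      simpa using this
    rw [hd, ← List.map_take, List.take_range]
    have hm : min t (N - d) = t := by omega
    rw [hm]
  rw [← List.map_drop, ← List.map_take, key, List.map_map]
  rfl

theorem pvA_eq_canon (a size column_size : Int) :
    unzip_binary_3 a size column_size = pvCanon a size.toNat column_size.toNat := by
  unfold unzip_binary_3
  set S := size.toNat with hS
  set C := column_size.toNat with hC
  have hlen1 : ((PySem.List.pyRange 0 column_size 1).map (fun _ => (0:Int))).length = C := by
    simp [PySem.List.length_pyRange_one, hC]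
  have hlenS : (PySem.List.pyRange 0 size 1).length = S := by
    simp [PySem.List.length_pyRange_one, hS]
  -- inner helper
  have hgIn : ∀ m : Nat,
      (((PySem.List.pyRange 0 column_size 1).map (fun _ => (0:Int))).foldl
        (fun (st3 : Int × List Int) _ =>
          (st3.1 * 2, st3.2 ++ [if PySem.Int.band a st3.1 > 0 then (1 : Int) else 0]))
        ((2 ^ m : Int), ([] : List Int)))
      = ((2 ^ (m + C) : Int), (List.range C).map (fun k => pvBit a (m + k))) := by
    intro m
    rw [pv_inner_fold a _ m []]
    rw [hlen1]
    simp
  -- middle helper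
  have hgMid : ∀ m : Nat,
      (((PySem.List.pyRange 0 size 1).map (fun _ =>
          (PySem.List.pyRange 0 column_size 1).map (fun _ => (0:Int)))).foldl
        (fun (st2 : Int × List (List Int)) J =>
          let r2 := J.foldl (fun (st3 : Int × List Int) _K =>
              (st3.1 * 2, st3.2 ++ [if PySem.Int.band a st3.1 > 0 then (1 : Int) else 0]))
            (st2.1, ([] : List Int))
          (r2.1, st2.2 ++ [r2.2]))
        ((2 ^ m : Int), ([] : List (List Int))))
      = ((2 ^ (m + S * C) : Int),
         (List.range S).map (fun j => (List.range C).map (fun k => pvBit a (m + j * C + k)))) := by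
    intro m
    rw [List.foldl_map]
    have := pv_block_fold
      (fun v => ((PySem.List.pyRange 0 column_size 1).map (fun _ => (0:Int))).foldl
          (fun (st3 : Int × List Int) _K =>
            (st3.1 * 2, st3.2 ++ [if PySem.Int.band a st3.1 > 0 then (1 : Int) else 0]))
          (v, ([] : List Int)))
      C (fun m => (List.range C).map (fun k => pvBit a (m + k)))
      (fun m => hgIn m)
      (PySem.List.pyRange 0 size 1) m ([] : List (List Int))
    refine this.trans ?_
    rw [hlenS]
    simp [Nat.add_assoc]
  -- outer
  have hfin :
      (((PySem.List.pyRange 0 size 1).map (fun _ =>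
          (PySem.List.pyRange 0 size 1).map (fun _ =>
            (PySem.List.pyRange 0 column_size 1).map (fun _ => (0:Int))))).foldl
        (fun (st : Int × List (List (List Int))) I =>
          let r := I.foldl (fun (st2 : Int × List (List Int)) J =>
              let r2 := J.foldl (fun (st3 : Int × List Int) _K =>
                  (st3.1 * 2, st3.2 ++ [if PySem.Int.band a st3.1 > 0 then (1 : Int) else 0]))
                (st2.1, ([] : List Int))
              (r2.1, st2.2 ++ [r2.2]))
            (st.1, ([] : List (List Int)))
          (r.1, st.2 ++ [r.2]))
        ((2 ^ 0 : Int), ([] : List (List (List Int)))))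
      = ((2 ^ (0 + S * (S * C)) : Int),
         ([] : List (List (List Int))) ++ (List.range S).map (fun i =>
           (List.range S).map (fun j =>
             (List.range C).map (fun k => pvBit a ((0 + i * (S * C)) + j * C + k))))) := by
    rw [List.foldl_map]
    have := pv_block_fold
      (fun v => ((PySem.List.pyRange 0 size 1).map (fun _ =>
          (PySem.List.pyRange 0 column_size 1).map (fun _ => (0:Int)))).foldl
        (fun (st2 : Int × List (List Int)) J =>
          let r2 := J.foldl (fun (st3 : Int × List Int) _K =>
              (st3.1 * 2, st3.2 ++ [if PySem.Int.band a st3.1 > 0 then (1 : Int) else 0]))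
            (st2.1, ([] : List Int))
          (r2.1, st2.2 ++ [r2.2]))
        (v, ([] : List (List Int))))
      (S * C)
      (fun m => (List.range S).map (fun j => (List.range C).map (fun k => pvBit a (m + j * C + k))))
      (fun m => hgMid m)
      (PySem.List.pyRange 0 size 1) 0 ([] : List (List (List Int)))
    refine this.trans ?_
    rw [hlenS]
  refine (congrArg Prod.snd hfin).trans ?_
  unfold pvCanon
  simp

theorem pvB_eq_canon (a size column_size : Int) :
    unzip_binary_3_alt a size column_size = pvCanon a size.toNat column_size.toNat := by
  unfold unzip_binary_3_alt
  set S := size.toNat with hS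
  set C := column_size.toNat with hC
  have hs : (if size > 0 then size else 0) = ((S : Int)) := by simp [hS]; omega
  have hc : (if column_size > 0 then column_size else 0) = ((C : Int)) := by simp [hC]; omega
  rw [hs, hc]
  simp only []
  show (let bits := (PySem.List.pyRange 0 ((S:Int) * S * C) 1).map (fun p => PySem.Int.band (a >>> p.toNat) 1);
    let rows := (PySem.List.pyRange 0 ((S:Int) * S) 1).map (fun r => PySem.List.slice bits (some (r * (C:Int))) (some ((r + 1) * C)));
    (PySem.List.pyRange 0 (S:Int) 1).map (fun i => PySem.List.slice rows (some (i * (S:Int))) (some ((i + 1) * S)))) = pvCanon a S C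
  simp only []
  have hN : ((S:Int) * S * C) = ((S*S*C : Nat) : Int) := by push_cast; ring
  have hN2 : ((S:Int) * S) = ((S*S : Nat) : Int) := by push_cast; ring
  rw [hN, hN2, PySem.List.pyRange_zero_nat, PySem.List.pyRange_zero_nat, PySem.List.pyRange_zero_nat,
    List.map_map, List.map_map, List.map_map]
  -- bits as mapped range of pvBit
  have hbits : (List.range (S*S*C)).map ((fun p => PySem.Int.band (a >>> p.toNat) 1) ∘ (fun k : Nat => (k : Int)))
      = (List.range (S*S*C)).map (fun k => pvBit a k) := by
    apply List.map_congr_left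
    intro k _
    simp only [Function.comp_apply, Int.toNat_natCast]
    rw [Int.shiftRight_natCast_right]
    exact pvBit_shift a k
  rw [hbits]
  unfold pvCanon
  apply List.map_congr_left
  intro i hi
  rw [List.mem_range] at hi
  simp only [Function.comp_apply]
  -- outer slice
  have h1 : ((i:Int) * S) = ((i*S : Nat) : Int) := by push_cast; ring
  have h2 : (((i:Int) + 1) * S) = ((i*S : Nat) : Int) + (S : Nat) := by push_cast; ring
  rw [h1, h2, PySem.List.slice_natCast_add, pv_drop_take_range _ _ _ _ (by nlinarith)]
  apply List.map_congr_left
  intro j hj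
  rw [List.mem_range] at hj
  simp only [Function.comp_apply]
  -- inner slice
  have h3 : (((i*S+j : Nat) : Int) * C) = (((i*S+j)*C : Nat) : Int) := by push_cast; ring
  have h4 : ((((i*S+j) : Nat) : Int) + 1) * C = (((i*S+j)*C : Nat) : Int) + (C : Nat) := by push_cast; ring
  rw [h3, h4, PySem.List.slice_natCast_add, pv_drop_take_range _ _ _ _ (by
    have h5 : i*S + j + 1 ≤ S*S := by nlinarith
    have h6 := mul_le_mul_right' h5 C
    have h7 : (i*S+j+1)*C = (i*S+j)*C + C := by ring
    linarith)]
  apply List.map_congr_left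
  intro k _
  congr 1
  ring

-- ===== VERDICT (by name: the statement is the Claim_ definition above) =====
theorem unzip_binary_3_spec : Claim_equal_unzip_binary_3 := by
  intro a size column_size _
  unfold Spec_unzip_binary_3
  rw [pvA_eq_canon, pvB_eq_canon]
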